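-- pv_equiv track=rewrite | github.com/mirrord/mindball | mindball.py | show_state
-- ===== SOURCE A (Python) =====
-- def show_state(game_state, p1_strength, p2_strength):
--     left_side = '='*game_state[0]
--     right_side = '='*game_state[1]
--     game_line = left_side + 'o' + right_side
--     p1_top = False
--     p2_top = False
--
--     #walk down the screen, starting at line 20
--     screen_state = ""
--     for j in range(20):
--         i = (20-j)*10
--         if p1_top:
--             screen_state += "||"
--         elif p1_strength > i:
--             p1_top = True
--             screen_state += "__"
--         elif p1_strength+10 > i:
--             screen_state += str(p1_strength)
--         else:
--             screen_state += "  "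
--
--         if j==10:
--             screen_state += (" "*4) + game_line + (" "*4)
--         else:
--             screen_state += (" "*30)
--
--         if p2_top:
--             screen_state += "||"
--         elif p2_strength > i:
--             p2_top = True
--             screen_state += "__"
--         elif p2_strength+10 > i:
--             screen_state += str(p2_strength)
--         else:
--             screen_state += "  "
--         screen_state += "\n"
--
--     return screen_state
-- ===== SOURCE B (Python) =====
-- def show_state(game_state, p1_strength, p2_strength):
--     game_line = '=' * game_state[0] + 'o' + '=' * game_state[1]
--
--     def column(s):
--         # cell on a row the bar has not reached: the strength printed on its own row, else blank
--         def free(j):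
--             i = (20 - j) * 10
--             return str(s) if s <= i < s + 10 else '  '
--         # first row (top to bottom) whose threshold the strength exceeds
--         latch = next((j for j in range(20) if s > (20 - j) * 10), None)
--         if latch is None:
--             return [free(j) for j in range(20)]
--         return [free(j) for j in range(latch)] + ['__'] + ['||'] * (19 - latch)
--
--     left = column(p1_strength)
--     right = column(p2_strength)
--     middle = [' ' * 30] * 20
--     middle[10] = ' ' * 4 + game_line + ' ' * 4
--     return ''.join(l + m + r + '\n' for l, m, r in zip(left, middle, right))
-- ===== Notes on version B (the rewrite author's own statement) =====
-- stated objective: alternative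
-- what changed: B replaces A's single loop threading two latch flags through 20 rows with per-column precomputation: it finds each column's latch row (the first row whose threshold the strength exceeds), builds the left, middle and right columns as independent row lists (the latched column as blocks: free cells, '__', then '||' repeated), and assembles the screen by zipping and joining them.
import Mathlib
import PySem

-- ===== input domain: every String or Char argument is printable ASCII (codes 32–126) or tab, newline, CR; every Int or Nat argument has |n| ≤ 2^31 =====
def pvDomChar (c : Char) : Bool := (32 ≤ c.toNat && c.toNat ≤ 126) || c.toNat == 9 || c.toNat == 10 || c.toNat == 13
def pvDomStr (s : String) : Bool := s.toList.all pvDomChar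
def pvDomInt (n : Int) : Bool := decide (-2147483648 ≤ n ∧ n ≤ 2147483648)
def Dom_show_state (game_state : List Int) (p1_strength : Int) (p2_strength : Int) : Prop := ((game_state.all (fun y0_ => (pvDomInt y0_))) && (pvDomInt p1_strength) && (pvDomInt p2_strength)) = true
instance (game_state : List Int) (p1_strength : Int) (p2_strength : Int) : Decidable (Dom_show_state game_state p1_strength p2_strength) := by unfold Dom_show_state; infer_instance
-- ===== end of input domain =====

-- B finds each column's latch row by a first-match search and builds the three columns as
-- independent row lists before zipping, instead of A's loop threading two flags. (objective: alternative)

-- ===== PORT A =====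
-- the loop body of A (one row j): left cell, middle, right cell, newline; flags thread through
def pvStepA (game_line : List Char) (p1_strength p2_strength : Int)
    (s : List Char × Bool × Bool) (j : Int) : List Char × Bool × Bool :=
  let i := (20 - j) * 10
  let st :=
    if s.2.1 then (s.1 ++ "||".toList, true)
    else if p1_strength > i then (s.1 ++ "__".toList, true)
    else if p1_strength + 10 > i then (s.1 ++ PySem.Int.toChars p1_strength, s.2.1)
    else (s.1 ++ "  ".toList, s.2.1)
  let ss :=
    if j == 10 then st.1 ++ "    ".toList ++ game_line ++ "    ".toList
    else st.1 ++ List.replicate 30 ' '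
  let st2 :=
    if s.2.2 then (ss ++ "||".toList, true)
    else if p2_strength > i then (ss ++ "__".toList, true)
    else if p2_strength + 10 > i then (ss ++ PySem.Int.toChars p2_strength, s.2.2)
    else (ss ++ "  ".toList, s.2.2)
  (st2.1 ++ ['\n'], st.2, st2.2)

def show_state (game_state : List Int) (p1_strength : Int) (p2_strength : Int) : String :=
  let left_side := List.replicate (PySem.List.pyGetD game_state 0 0).toNat '='
  let right_side := List.replicate (PySem.List.pyGetD game_state 1 0).toNat '='
  let game_line := left_side ++ ['o'] ++ right_side
  String.ofList ((PySem.List.pyRange 0 20 1).foldl (pvStepA game_line p1_strength p2_strength)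
    ([], false, false)).1

-- ===== PORT B =====
-- free(j): cell on a row the bar has not reached
def pvFree (s j : Int) : List Char :=
  let i := (20 - j) * 10
  if s ≤ i ∧ i < s + 10 then PySem.Int.toChars s else "  ".toList

-- column(s): find the first row whose threshold the strength exceeds, then build as blocks
def pvColumn (s : Int) : List (List Char) :=
  match (PySem.List.pyRange 0 20 1).find? (fun j => decide (s > (20 - j) * 10)) with
  | none => (PySem.List.pyRange 0 20 1).map (pvFree s)
  | some latch =>
      (PySem.List.pyRange 0 latch 1).map (pvFree s) ++ ["__".toList]
        ++ List.replicate (19 - latch).toNat "||".toList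

def show_state_alt (game_state : List Int) (p1_strength : Int) (p2_strength : Int) : String :=
  let game_line := List.replicate (PySem.List.pyGetD game_state 0 0).toNat '=' ++ ['o'] ++
    List.replicate (PySem.List.pyGetD game_state 1 0).toNat '='
  let left := pvColumn p1_strength
  let right := pvColumn p2_strength
  let middle := (List.replicate 20 (List.replicate 30 ' ')).set 10
    ("    ".toList ++ game_line ++ "    ".toList)
  String.ofList (((left.zip (middle.zip right)).map
    (fun x => x.1 ++ x.2.1 ++ x.2.2 ++ ['\n'])).flatten)

-- ===== PRECONDITION & SPEC =====
-- A raises IndexError when game_state has fewer than two elements (game_state[1]); B does too.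
def Pre_show_state (game_state : List Int) (p1_strength : Int) (p2_strength : Int) : Prop :=
  2 ≤ game_state.length
instance (game_state : List Int) (p1_strength : Int) (p2_strength : Int) : Decidable (Pre_show_state game_state p1_strength p2_strength) := by unfold Pre_show_state; infer_instance
def pvWitness_show_state : List Int × Int × Int := ([2, 3], 50, 120)

def Spec_show_state (game_state : List Int) (p1_strength : Int) (p2_strength : Int) (out : String) : Prop := out = show_state_alt game_state p1_strength p2_strength
instance (game_state : List Int) (p1_strength : Int) (p2_strength : Int) (out : String) : Decidable (Spec_show_state game_state p1_strength p2_strength out) := by unfold Spec_show_state; infer_instance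

-- ===== CLAIM (what is proved, stated in full; the proofs are below) =====
def Claim_equal_show_state : Prop := ∀ (game_state : List Int) (p1_strength : Int) (p2_strength : Int), Dom_show_state game_state p1_strength p2_strength → Pre_show_state game_state p1_strength p2_strength → Spec_show_state game_state p1_strength p2_strength (show_state game_state p1_strength p2_strength)

-- ===== LEMMAS AND PROOFS =====

-- A's per-column row step (one cell + updated flag), extracted from pvStepA
def pvRowA (s : Int) (f : Bool) (j : Int) : List Char × Bool :=
  if f then ("||".toList, f)
  else if s > (20 - j) * 10 then ("__".toList, true)
  else if s + 10 > (20 - j) * 10 then (PySem.Int.toChars s, f)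
  else ("  ".toList, f)

-- the middle column as a function of the row index
def pvMid (game_line : List Char) (j : Int) : List Char :=
  if j == 10 then "    ".toList ++ game_line ++ "    ".toList else List.replicate 30 ' '

-- A's column cells with the flag threaded, over a list of row indices
def pvColA (s : Int) (f : Bool) : List Int → List (List Char)
  | [] => []
  | j :: js => (pvRowA s f j).1 :: pvColA s (pvRowA s f j).2 js

-- the flag A holds when ENTERING row j
def pvFlag (s : Int) (j : Int) : Bool := decide (0 < j ∧ (21 - j) * 10 < s)

-- A's cell on row j as a function of (s, j) alone
def pvCellP (s j : Int) : List Char :=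
  if pvFlag s j then "||".toList
  else if s > (20 - j) * 10 then "__".toList
  else if s + 10 > (20 - j) * 10 then PySem.Int.toChars s
  else "  ".toList

lemma pvStepA_eq (gl : List Char) (p1 p2 : Int) (ss : List Char) (f1 f2 : Bool) (j : Int) :
    pvStepA gl p1 p2 (ss, f1, f2) j =
      (ss ++ (pvRowA p1 f1 j).1 ++ pvMid gl j ++ (pvRowA p2 f2 j).1 ++ ['\n'],
       (pvRowA p1 f1 j).2, (pvRowA p2 f2 j).2) := by
  cases f1 <;> cases f2 <;>
    simp only [pvStepA, pvRowA, pvMid] <;> split_ifs <;> simp_all [List.append_assoc]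

lemma pvRowA_flag (s j : Int) (hj : 0 ≤ j) :
    pvRowA s (pvFlag s j) j = (pvCellP s j, pvFlag s (j + 1)) := by
  simp only [pvRowA, pvCellP, pvFlag]
  split_ifs <;> simp_all [Prod.ext_iff] <;>
    first
      | omega
      | (simp only [← Bool.decide_and, decide_eq_decide]; omega)

lemma pvColA_pyRange (s : Int) : ∀ (n : Nat) (j : Int), 0 ≤ j →
    pvColA s (pvFlag s j) (PySem.List.pyRange j (j + n) 1) =
      (PySem.List.pyRange j (j + n) 1).map (pvCellP s) := by
  intro n
  induction n with
  | zero =>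
      intro j hj
      simp [pvColA, PySem.List.pyRange]
  | succ n ih =>
      intro j hj
      have hlt : j < j + (n + 1 : Nat) := by omega
      rw [PySem.List.pyRange_one_cons hlt]
      simp only [pvColA, List.map_cons]
      rw [pvRowA_flag s j hj]
      have := ih (j + 1) (by omega)
      rw [show (j + 1) + (n : Int) = j + ((n + 1 : Nat) : Int) by push_cast; ring] at this
      push_cast at this ⊢
      rw [this]

lemma pvInterleave (gl : List Char) (p1 p2 : Int) : ∀ (js : List Int) (ss : List Char) (f1 f2 : Bool),
    (js.foldl (pvStepA gl p1 p2) (ss, f1, f2)).1 =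
      ss ++ (((pvColA p1 f1 js).zip ((js.map (pvMid gl)).zip (pvColA p2 f2 js))).map
        (fun x => x.1 ++ x.2.1 ++ x.2.2 ++ ['\n'])).flatten := by
  intro js
  induction js with
  | nil => intro ss f1 f2; simp [pvColA]
  | cons j js ih =>
      intro ss f1 f2
      simp only [List.foldl_cons, pvStepA_eq, pvColA, List.map_cons, List.zip_cons_cons,
        List.flatten_cons, ih]
      simp [List.append_assoc]

-- first match of a predicate on pyRange a (a+n) 1: it holds there and at no earlier index
lemma pvFindMin (p : Int → Bool) : ∀ (n : Nat) (a L : Int),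
    (PySem.List.pyRange a (a + n) 1).find? p = some L →
      a ≤ L ∧ L < a + n ∧ p L = true ∧ ∀ j, a ≤ j → j < L → p j = false := by
  intro n
  induction n with
  | zero =>
      intro a L h
      simp at h
  | succ n ih =>
      intro a L h
      rw [PySem.List.pyRange_one_cons (by omega : a < a + ((n+1 : Nat) : Int))] at h
      rw [List.find?_cons] at h
      by_cases hp : p a = true
      · simp [hp] at h
        subst h
        exact ⟨le_refl _, by omega, hp, fun j h1 h2 => by omega⟩
      · simp [hp] at h
        have := ih (a + 1) L (by rw [show a + 1 + (n : Int) = a + ((n+1 : Nat) : Int) by push_cast; ring]; exact h)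
        refine ⟨by omega, by push_cast at this ⊢; omega, this.2.2.1, ?_⟩
        intro j h1 h2
        rcases eq_or_lt_of_le h1 with rfl | h1'
        · simpa using hp
        · exact this.2.2.2 j (by omega) h2

-- A's closed cell column equals B's block-built column
lemma pvCol_eq (s : Int) :
    (PySem.List.pyRange 0 20 1).map (pvCellP s) = pvColumn s := by
  unfold pvColumn
  cases hf : (PySem.List.pyRange 0 20 1).find? (fun j => decide (s > (20 - j) * 10)) with
  | none =>
      have hnone := List.find?_eq_none.mp hf
      apply List.map_congr_left
      intro j hj
      have hj' := PySem.List.mem_pyRange_one.mp hj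
      have h1 : ¬ (20 - j) * 10 < s := by
        have := hnone j hj; simp at this; omega
      have h2 : pvFlag s j = false := by
        by_cases hjpos : 0 < j
        · have := hnone (j - 1) (PySem.List.mem_pyRange_one.mpr (by omega))
          simp at this
          simp [pvFlag]; omega
        · simp [pvFlag]; omega
      simp only [pvCellP, pvFree, h2, Bool.false_eq_true, if_false]
      split_ifs <;> first | rfl | omega
  | some L =>
      obtain ⟨hL0, hL20, hpL, hmin⟩ := pvFindMin _ 20 0 L (by simpa using hf)
      simp only [Int.zero_add] at hL20
      simp at hpL
      rw [PySem.List.pyRange_one_append (a := 0) (m := L) (b := 20) (by omega) (by omega),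
        PySem.List.pyRange_one_cons (by omega : L < 20), List.map_append, List.map_cons]
      have hbefore : (PySem.List.pyRange 0 L 1).map (pvCellP s)
          = (PySem.List.pyRange 0 L 1).map (pvFree s) := by
        apply List.map_congr_left
        intro j hj
        have hj' := PySem.List.mem_pyRange_one.mp hj
        have h1 : ¬ (20 - j) * 10 < s := by
          have := hmin j hj'.1 hj'.2; simp at this; omega
        have h2 : pvFlag s j = false := by
          by_cases hjpos : 0 < j
          · have := hmin (j - 1) (by omega) (by omega)
            simp at this
            simp [pvFlag]; omega
          · simp [pvFlag]; omega
        simp only [pvCellP, pvFree, h2, Bool.false_eq_true, if_false]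
        split_ifs <;> first | rfl | omega
      have hlatch : pvCellP s L = "__".toList := by
        have h2 : pvFlag s L = false := by
          by_cases hLpos : 0 < L
          · have := hmin (L - 1) (by omega) (by omega)
            simp at this
            simp [pvFlag]; omega
          · simp [pvFlag]; omega
        simp [pvCellP, h2, hpL]
      have hafter : (PySem.List.pyRange (L + 1) 20 1).map (pvCellP s)
          = List.replicate (19 - L).toNat "||".toList := by
        have hc : (PySem.List.pyRange (L + 1) 20 1).map (pvCellP s)
            = (PySem.List.pyRange (L + 1) 20 1).map (fun _ => "||".toList) := by
          apply List.map_congr_left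
          intro j hj
          have hj' := PySem.List.mem_pyRange_one.mp hj
          have hfl : pvFlag s j = true := by
            simp [pvFlag]
            constructor
            · omega
            · nlinarith [hpL]
          simp [pvCellP, hfl]
        rw [hc, List.map_const']
        congr 1
        rw [PySem.List.length_pyRange_one]
        omega
      rw [hbefore, hlatch, hafter]
      simp

-- ===== VERDICT (by name: the statement is the Claim_ definition above) =====
theorem show_state_spec : Claim_equal_show_state := by
  intro gs p1 p2 _ _
  unfold Spec_show_state show_state show_state_alt
  dsimp only
  rw [pvInterleave]
  have h0 : (PySem.List.pyRange 0 20 1) = PySem.List.pyRange 0 (0 + (20 : Nat)) 1 := by norm_num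
  have hc1 : pvColA p1 false (PySem.List.pyRange 0 20 1) =
      (PySem.List.pyRange 0 20 1).map (pvCellP p1) := by
    rw [h0, show (false : Bool) = pvFlag p1 0 by simp [pvFlag]]
    exact pvColA_pyRange p1 20 0 (by omega)
  have hc2 : pvColA p2 false (PySem.List.pyRange 0 20 1) =
      (PySem.List.pyRange 0 20 1).map (pvCellP p2) := by
    rw [h0, show (false : Bool) = pvFlag p2 0 by simp [pvFlag]]
    exact pvColA_pyRange p2 20 0 (by omega)
  rw [hc1, hc2, pvCol_eq, pvCol_eq]
  rfl
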